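-- pv_equiv track=rewrite | github.com/senali-d/Hybrid-GA-Framework | src/problems/timetabling.py | countRoomClashes
-- ===== SOURCE A (Python) =====
-- def countRoomClashes(timetable):
--     used = {}
--     violations = 0
--     for m, r, t in timetable:
--         if (r, t) in used:
--             violations += 1
--         else:
--             used[(r, t)] = m
--     return violations
-- ===== SOURCE B (Python) =====
-- def countRoomClashes(timetable):
--     slots = [(r, t) for m, r, t in timetable]
--     violations = 0
--     while slots:
--         head = slots[0]
--         rest = slots[1:]
--         violations += rest.count(head)
--         slots = [x for x in rest if x != head]
--     return violations
-- ===== Notes on version B (the rewrite author's own statement) =====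
-- stated objective: alternative
-- what changed: Replaces A's single pass with a seen-dict by a group-removal loop: repeatedly take the first slot, add the count of its later duplicates, and filter its whole group out of the remaining list.
import Mathlib
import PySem

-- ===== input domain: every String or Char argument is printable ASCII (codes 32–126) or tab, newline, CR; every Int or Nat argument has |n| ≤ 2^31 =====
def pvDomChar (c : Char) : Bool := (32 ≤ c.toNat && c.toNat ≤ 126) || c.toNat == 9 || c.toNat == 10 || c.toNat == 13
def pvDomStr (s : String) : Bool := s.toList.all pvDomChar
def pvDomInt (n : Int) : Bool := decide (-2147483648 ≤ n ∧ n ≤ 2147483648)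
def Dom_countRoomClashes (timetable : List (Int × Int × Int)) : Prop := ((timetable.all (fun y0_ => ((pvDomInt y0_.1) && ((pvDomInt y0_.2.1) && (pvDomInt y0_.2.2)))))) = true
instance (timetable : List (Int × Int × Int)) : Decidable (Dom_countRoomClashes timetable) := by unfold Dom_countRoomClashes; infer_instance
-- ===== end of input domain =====

-- B replaces A's seen-dict single pass by group removal: repeatedly take the first slot,
-- add the number of its later duplicates, and drop its whole group (objective: alternative).

-- ===== PORT A =====
-- A's for-loop over (m, r, t), threading the dict `used` and counter `violations`.
def countRoomClashesLoop : List (Int × Int × Int) → PySem.Dict (Int × Int) Int → Int → Int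
  | [], _, violations => violations
  | (m, r, t) :: rest, used, violations =>
      if used.contains (r, t) then
        countRoomClashesLoop rest used (violations + 1)
      else
        countRoomClashesLoop rest (used.insert (r, t) m) violations

def countRoomClashes (timetable : List (Int × Int × Int)) : Int :=
  countRoomClashesLoop timetable PySem.Dict.empty 0

-- ===== PORT B =====
-- B's while-loop: count the head slot's duplicates in the rest, then filter its group away.
def countRoomClashesAltLoop : List (Int × Int) → Int → Int
  | [], violations => violations
  | head :: rest, violations =>
      countRoomClashesAltLoop (rest.filter (fun x => x ≠ head))
        (violations + PySem.List.count rest head)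
termination_by slots _ => slots.length
decreasing_by
  simp only [List.length_unattach]
  exact Nat.lt_succ_of_le (le_trans (List.length_filter_le _ _) (by simp))

def countRoomClashes_alt (timetable : List (Int × Int × Int)) : Int :=
  let slots := timetable.map (fun x => (x.2.1, x.2.2))
  countRoomClashesAltLoop slots 0

-- ===== PRECONDITION & SPEC =====
def Spec_countRoomClashes (timetable : List (Int × Int × Int)) (out : Int) : Prop := out = countRoomClashes_alt timetable
instance (timetable : List (Int × Int × Int)) (out : Int) : Decidable (Spec_countRoomClashes timetable out) := by unfold Spec_countRoomClashes; infer_instance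

-- ===== CLAIM (what is proved, stated in full; the proofs are below) =====
def Claim_equal_countRoomClashes : Prop := ∀ (timetable : List (Int × Int × Int)), Dom_countRoomClashes timetable → Spec_countRoomClashes timetable (countRoomClashes timetable)

-- ===== LEMMAS AND PROOFS =====

-- A-side invariant: the final counter is the processed list's length minus the number of new distinct keys.
lemma countRoomClashesLoop_eq (l : List (Int × Int × Int)) :
    ∀ (d : PySem.Dict (Int × Int) Int) (v : Int),
      countRoomClashesLoop l d v =
        v + (l.length : Int) -
          (((PySem.Set.update d.keys (l.map (fun x => (x.2.1, x.2.2)))).length : Int) - (d.keys.length : Int)) := by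
  induction l with
  | nil => intro d v; simp [countRoomClashesLoop, PySem.Set.update]
  | cons hd rest ih =>
    intro d v
    obtain ⟨m, r, t⟩ := hd
    by_cases h : d.contains (r, t)
    · have hmem : (r, t) ∈ d.keys := (PySem.Dict.contains_iff_mem_keys d (r, t)).mp h
      simp only [countRoomClashesLoop, h, if_pos, List.map_cons, PySem.Set.update_cons,
        PySem.Set.add_of_mem hmem, ih, List.length_cons]
      push_cast; omega
    · have hnmem : (r, t) ∉ d.keys := fun hm => h ((PySem.Dict.contains_iff_mem_keys d (r, t)).mpr hm)
      have hkeys : (d.insert (r, t) m).keys = d.keys ++ [(r, t)] :=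
        PySem.Dict.keys_insert_of_not_contains d m (by simpa using h)
      simp only [countRoomClashesLoop, h, List.map_cons, PySem.Set.update_cons,
        PySem.Set.add_of_not_mem hnmem, ih, hkeys, List.length_cons, List.length_append,
        List.length_nil]
      push_cast
      omega

-- The number of distinct elements, as a Finset cardinality.
lemma ofList_length_eq_toFinset_card (xs : List (Int × Int)) :
    (PySem.Set.ofList xs).length = xs.toFinset.card := by
  have hnd : (PySem.Set.ofList xs).Nodup := PySem.Set.nodup_ofList xs
  have hfs : (PySem.Set.ofList xs).toFinset = xs.toFinset := by
    ext x; simp [PySem.Set.mem_ofList]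
  calc (PySem.Set.ofList xs).length = (PySem.Set.ofList xs).toFinset.card :=
        (List.toFinset_card_of_nodup hnd).symm
    _ = xs.toFinset.card := by rw [hfs]

-- B-side invariant: group removal also computes length minus the number of distinct elements.
lemma countRoomClashesAltLoop_eq (n : ℕ) :
    ∀ (xs : List (Int × Int)), xs.length ≤ n → ∀ (v : Int),
      countRoomClashesAltLoop xs v = v + (xs.length : Int) - (xs.toFinset.card : Int) := by
  induction n with
  | zero =>
    intro xs hlen v
    have : xs = [] := List.length_eq_zero_iff.mp (Nat.le_zero.mp hlen)
    subst this; rw [countRoomClashesAltLoop.eq_1]; simp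
  | succ n ih =>
    intro xs hlen v
    match xs with
    | [] => rw [countRoomClashesAltLoop.eq_1]; simp
    | head :: rest =>
      have hflen : (rest.filter (fun x => x ≠ head)).length ≤ n := by
        have := List.length_filter_le (fun x => decide (x ≠ head)) rest
        simp at hlen; omega
      rw [countRoomClashesAltLoop.eq_2, ih _ hflen]
      have hsplit : rest.count head + (rest.filter (fun x => x ≠ head)).length = rest.length := by
        have h1 := List.length_eq_length_filter_add (l := rest) (fun x => x == head)
        have h0 : rest.filter (fun x => !(x == head)) = rest.filter (fun x => x ≠ head) :=
          List.filter_congr (fun x _ => by by_cases h : x = head <;> simp [h])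
        rw [h0] at h1
        have h3 : rest.count head = (rest.filter (fun x => x == head)).length := by
          rw [List.count_eq_countP, List.countP_eq_length_filter]
        omega
      have hcard : (head :: rest).toFinset.card = (rest.filter (fun x => x ≠ head)).toFinset.card + 1 := by
        have hfil : (rest.filter (fun x => x ≠ head)).toFinset = rest.toFinset.erase head := by
          ext x; simp [and_comm]
        rw [List.toFinset_cons, hfil]
        rw [Finset.card_insert_eq_ite]
        by_cases hmem : head ∈ rest.toFinset
        · simp [hmem, Finset.card_erase_of_mem hmem,
            Nat.sub_add_cancel (Finset.card_pos.mpr ⟨head, hmem⟩)]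
        · simp [hmem]
      rw [PySem.List.count_eq]
      simp only [List.length_cons, hcard]
      push_cast
      omega

-- ===== VERDICT (by name: the statement is the Claim_ definition above) =====
theorem countRoomClashes_spec : Claim_equal_countRoomClashes := by
  intro timetable _
  unfold Spec_countRoomClashes countRoomClashes countRoomClashes_alt
  rw [countRoomClashesLoop_eq,
    countRoomClashesAltLoop_eq (timetable.map (fun x => (x.2.1, x.2.2))).length _ (le_refl _),
    ← ofList_length_eq_toFinset_card]
  simp [PySem.Set.ofList_eq_foldl, PySem.Set.update]
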